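-- pv_equiv track=rewrite | github.com/emilyfehr99/Automated-Post-Game-Reports | instat_league_metrics_aggregator.py | _extract_home_away_record
-- ===== SOURCE A (Python) =====
-- from typing import Dict, List, Optional, Any, Tuple
--
-- def _extract_home_away_record(games: List[Dict[str, Any]], location: str) -> Dict[str, int]:
--     """Extract home or away record from games"""
--     location_games = [g for g in games if location.lower() in g.get("location", "").lower()]
--
--     wins = sum(1 for g in location_games if "win" in g.get("status", "").lower())
--     losses = sum(1 for g in location_games if "loss" in g.get("status", "").lower())
--     ties = sum(1 for g in location_games if "tie" in g.get("status", "").lower())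
--
--     return {
--         "wins": wins,
--         "losses": losses,
--         "ties": ties,
--         "total": len(location_games)
--     }
-- ===== SOURCE B (Python) =====
-- def _extract_home_away_record(games, location):
--     """Single pass: one loop over games with explicit counters."""
--     wins = losses = ties = total = 0
--     loc = location.lower()
--     for g in games:
--         if loc in g.get("location", "").lower():
--             total += 1
--             st = g.get("status", "").lower()
--             if "win" in st:
--                 wins += 1
--             if "loss" in st:
--                 losses += 1
--             if "tie" in st:
--                 ties += 1
--     return {"wins": wins, "losses": losses, "ties": ties, "total": total}
-- ===== Notes on version B (the rewrite author's own statement) =====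
-- stated objective: faster
-- what changed: Replaces the filtered intermediate list plus three separate counting scans (four passes) with a single loop over games maintaining four explicit counters, lowering location and each status only once.
import Mathlib
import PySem

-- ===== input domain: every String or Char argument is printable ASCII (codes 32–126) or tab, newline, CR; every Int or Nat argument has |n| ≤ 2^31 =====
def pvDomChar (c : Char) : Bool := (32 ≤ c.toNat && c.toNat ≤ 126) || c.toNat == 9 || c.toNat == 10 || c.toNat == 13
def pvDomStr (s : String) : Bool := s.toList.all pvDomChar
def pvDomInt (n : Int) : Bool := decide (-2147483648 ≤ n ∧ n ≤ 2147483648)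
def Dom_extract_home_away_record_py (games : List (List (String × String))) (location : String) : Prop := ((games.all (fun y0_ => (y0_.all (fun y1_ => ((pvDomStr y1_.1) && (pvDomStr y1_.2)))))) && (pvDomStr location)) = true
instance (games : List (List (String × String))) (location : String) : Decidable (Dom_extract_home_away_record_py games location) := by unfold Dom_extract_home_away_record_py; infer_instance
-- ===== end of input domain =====

-- B replaces A's filtered intermediate list plus three separate counting scans with one
-- loop over the games maintaining four explicit counters (simpler, single pass).

-- ===== PORT A =====
-- filter by location substring, then three independent counting passes plus len
def extract_home_away_record_py (games : List (List (String × String))) (location : String) : List (String × Int) :=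
  let location_games := games.filter (fun g =>
    PySem.Str.isIn (PySem.Str.lower location) (PySem.Str.lower ((PySem.Dict.ofList g).getD "location" "")))
  let wins : Int := (location_games.countP (fun g =>
    PySem.Str.isIn "win" (PySem.Str.lower ((PySem.Dict.ofList g).getD "status" ""))) : Nat)
  let losses : Int := (location_games.countP (fun g =>
    PySem.Str.isIn "loss" (PySem.Str.lower ((PySem.Dict.ofList g).getD "status" ""))) : Nat)
  let ties : Int := (location_games.countP (fun g =>
    PySem.Str.isIn "tie" (PySem.Str.lower ((PySem.Dict.ofList g).getD "status" ""))) : Nat)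
  [("wins", wins), ("losses", losses), ("ties", ties), ("total", (location_games.length : Nat))]

-- ===== PORT B =====
-- the for-loop of Source B: four counters threaded through one pass over games
def pvLoop (loc : String) (games : List (List (String × String)))
    (acc : Int × Int × Int × Int) : Int × Int × Int × Int :=
  match games with
  | [] => acc
  | g :: gs =>
    if PySem.Str.isIn loc (PySem.Str.lower ((PySem.Dict.ofList g).getD "location" "")) then
      let st := PySem.Str.lower ((PySem.Dict.ofList g).getD "status" "")
      pvLoop loc gs
        (acc.1 + (if PySem.Str.isIn "win" st then 1 else 0),
         acc.2.1 + (if PySem.Str.isIn "loss" st then 1 else 0),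
         acc.2.2.1 + (if PySem.Str.isIn "tie" st then 1 else 0),
         acc.2.2.2 + 1)
    else
      pvLoop loc gs acc

def extract_home_away_record_py_alt (games : List (List (String × String))) (location : String) : List (String × Int) :=
  let loc := PySem.Str.lower location
  let s := pvLoop loc games (0, 0, 0, 0)
  [("wins", s.1), ("losses", s.2.1), ("ties", s.2.2.1), ("total", s.2.2.2)]

-- ===== PRECONDITION & SPEC =====
def Spec_extract_home_away_record_py (games : List (List (String × String))) (location : String) (out : List (String × Int)) : Prop := out = extract_home_away_record_py_alt games location
instance (games : List (List (String × String))) (location : String) (out : List (String × Int)) : Decidable (Spec_extract_home_away_record_py games location out) := by unfold Spec_extract_home_away_record_py; infer_instance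

-- ===== CLAIM (what is proved, stated in full; the proofs are below) =====
def Claim_equal_extract_home_away_record_py : Prop := ∀ (games : List (List (String × String))) (location : String), Dom_extract_home_away_record_py games location → Spec_extract_home_away_record_py games location (extract_home_away_record_py games location)

-- ===== LEMMAS AND PROOFS =====

-- the loop computes the four filtered counts, each offset by its starting accumulator
theorem pvLoop_eq (loc : String) (games : List (List (String × String)))
    (acc : Int × Int × Int × Int) :
    pvLoop loc games acc =
      (acc.1 + ((games.filter (fun g =>
          PySem.Str.isIn loc (PySem.Str.lower ((PySem.Dict.ofList g).getD "location" "")))).countP (fun g =>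
          PySem.Str.isIn "win" (PySem.Str.lower ((PySem.Dict.ofList g).getD "status" ""))) : Nat),
       acc.2.1 + ((games.filter (fun g =>
          PySem.Str.isIn loc (PySem.Str.lower ((PySem.Dict.ofList g).getD "location" "")))).countP (fun g =>
          PySem.Str.isIn "loss" (PySem.Str.lower ((PySem.Dict.ofList g).getD "status" ""))) : Nat),
       acc.2.2.1 + ((games.filter (fun g =>
          PySem.Str.isIn loc (PySem.Str.lower ((PySem.Dict.ofList g).getD "location" "")))).countP (fun g =>
          PySem.Str.isIn "tie" (PySem.Str.lower ((PySem.Dict.ofList g).getD "status" ""))) : Nat),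
       acc.2.2.2 + ((games.filter (fun g =>
          PySem.Str.isIn loc (PySem.Str.lower ((PySem.Dict.ofList g).getD "location" "")))).length : Nat)) := by
  induction games generalizing acc with
  | nil => simp [pvLoop]
  | cons g gs ih =>
    simp only [pvLoop, List.filter_cons]
    by_cases h : PySem.Str.isIn loc (PySem.Str.lower ((PySem.Dict.ofList g).getD "location" "")) = true
    · simp only [h, if_true, ih, List.countP_cons, List.length_cons]
      obtain ⟨a, b, c, d⟩ := acc
      simp only []
      refine Prod.ext ?_ (Prod.ext ?_ (Prod.ext ?_ ?_)) <;>
        · simp only []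
          first
          | (split <;> push_cast <;> ring)
          | (push_cast; ring)
    · simp only [h, if_false, ih, Bool.false_eq_true]

-- ===== VERDICT (by name: the statement is the Claim_ definition above) =====
theorem extract_home_away_record_py_spec : Claim_equal_extract_home_away_record_py := by
  intro games location _
  unfold Spec_extract_home_away_record_py extract_home_away_record_py extract_home_away_record_py_alt
  simp only [pvLoop_eq, zero_add]
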